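-- pv_equiv track=rewrite | github.com/gitdshi/quantmate | app/infrastructure/db/migrate.py | _strip_leading_sql_comments
-- ===== SOURCE A (Python) =====
-- def _strip_leading_sql_comments(stmt: str) -> str:
--     """Remove only leading SQL comments so commented statements still execute."""
--     i = 0
--     length = len(stmt)
--     while i < length:
--         while i < length and stmt[i].isspace():
--             i += 1
--         if stmt.startswith("--", i):
--             newline = stmt.find("\n", i)
--             if newline == -1:
--                 return ""
--             i = newline + 1
--             continue
--         if stmt.startswith("/*", i):
--             end = stmt.find("*/", i + 2)
--             if end == -1:
--                 return ""
--             i = end + 2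
--             continue
--         break
--     return stmt[i:].strip()
-- ===== SOURCE B (Python) =====
-- def _strip_leading_sql_comments(stmt: str) -> str:
--     """Single-pass DFA: scan chars once, tracking comment state; no find/startswith."""
--     # states: 0 outside, 1 seen '-', 2 in line comment, 3 seen '/', 4 in block, 5 seen '*' in block
--     state = 0
--     start = None
--     for idx, ch in enumerate(stmt):
--         if state == 0:
--             if ch.isspace():
--                 continue
--             if ch == '-':
--                 state = 1
--             elif ch == '/':
--                 state = 3
--             else:
--                 start = idx
--                 break
--         elif state == 1:
--             if ch == '-':
--                 state = 2
--             else: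
--                 start = idx - 1
--                 break
--         elif state == 2:
--             if ch == '\n':
--                 state = 0
--         elif state == 3:
--             if ch == '*':
--                 state = 4
--             else:
--                 start = idx - 1
--                 break
--         elif state == 4:
--             if ch == '*':
--                 state = 5
--         else:  # state == 5
--             if ch == '/':
--                 state = 0
--             elif ch != '*':
--                 state = 4
--     if start is None:
--         if state == 1 or state == 3:
--             return stmt[-1:].strip()
--         return ""
--     return stmt[start:].strip()
-- ===== Notes on version B (the rewrite author's own statement) =====
-- stated objective: alternative
-- what changed: Replaces A's index-based scanning with startswith/find jumps by a single left-to-right pass of a six-state DFA over the characters that tracks whitespace/line-comment/block-comment state and records where code starts.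
import Mathlib
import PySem

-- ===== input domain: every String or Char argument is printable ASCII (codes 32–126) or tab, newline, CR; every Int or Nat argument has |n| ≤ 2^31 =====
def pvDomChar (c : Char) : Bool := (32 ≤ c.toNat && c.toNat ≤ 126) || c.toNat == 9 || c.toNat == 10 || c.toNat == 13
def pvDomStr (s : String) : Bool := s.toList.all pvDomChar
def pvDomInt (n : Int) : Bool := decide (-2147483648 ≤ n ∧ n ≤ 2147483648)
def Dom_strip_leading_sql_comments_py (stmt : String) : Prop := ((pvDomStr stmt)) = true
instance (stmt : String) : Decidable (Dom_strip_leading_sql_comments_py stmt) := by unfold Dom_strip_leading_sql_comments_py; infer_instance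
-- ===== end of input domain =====

-- B replaces A's index jumps (startswith / str.find) with a single-pass six-state DFA over the characters; same O(n) cost, different traversal.

-- ===== PORT A =====
-- bounds lemmas cited by aLoop's decreasing_by

theorem pvFindFrom_neg_of_gt (s sub : List Char) (k : Nat) (h : s.length < k) :
    PySem.Chars.findFrom s sub (k : Int) none = -1 := by
  simp only [PySem.Chars.findFrom]
  have hk : (s.length : Int) < (k : Int) := by exact_mod_cast h
  rw [if_neg (by omega : ¬ (k : Int) < 0), if_pos (by omega)]

theorem pvFindFrom_bounds (s sub : List Char) (k : Nat)
    (h : PySem.Chars.findFrom s sub (k : Int) none ≠ -1) :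
    (k : Int) ≤ PySem.Chars.findFrom s sub (k : Int) none ∧
      (PySem.Chars.findFrom s sub (k : Int) none).toNat + sub.length ≤ s.length := by
  by_cases hk : k ≤ s.length
  · obtain ⟨h1, h2, -⟩ := PySem.Chars.findFrom_natCast_spec s sub k hk h
    have h3 := h2.length_le
    rw [List.length_drop] at h3
    have h4 : PySem.Chars.findFrom s sub (k : Int) none ≤ (s.length : Int) := by
      rw [PySem.Chars.findFrom_natCast s sub k hk]
      have h5 := PySem.Chars.find_le_length (List.drop k s) sub
      rw [List.length_drop] at h5
      split <;> omega
    exact ⟨h1, by omega⟩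
  · exact absurd (pvFindFrom_neg_of_gt s sub k (by omega)) h

-- inner `while i < length and stmt[i].isspace(): i += 1`
def aSkipWs (cs : List Char) (i : Nat) : Nat :=
  if h : i < cs.length then
    if PySem.Chars.isspace cs[i] then aSkipWs cs (i + 1) else i
  else i
termination_by cs.length - i

theorem aSkipWs_ge (cs : List Char) (i : Nat) : i ≤ aSkipWs cs i := by
  fun_induction aSkipWs with
  | case1 i h hs ih => omega
  | case2 => omega
  | case3 => omega

-- outer while loop; `none` models the two `return ""` exits, `some i` the final break/exit
def aLoop (cs : List Char) (i : Nat) : Option Nat :=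
  if hlt : i < cs.length then
    if PySem.Chars.startswith (cs.drop (aSkipWs cs i)) ['-', '-'] then
      if hn : PySem.Chars.findFrom cs ['\n'] ((aSkipWs cs i : Nat) : Int) none = -1 then none
      else
        have hb := pvFindFrom_bounds cs ['\n'] (aSkipWs cs i) hn
        aLoop cs ((PySem.Chars.findFrom cs ['\n'] ((aSkipWs cs i : Nat) : Int) none).toNat + 1)
    else if PySem.Chars.startswith (cs.drop (aSkipWs cs i)) ['/', '*'] then
      if he : PySem.Chars.findFrom cs ['*', '/'] ((aSkipWs cs i + 2 : Nat) : Int) none = -1 then none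
      else
        have hb := pvFindFrom_bounds cs ['*', '/'] (aSkipWs cs i + 2) he
        aLoop cs ((PySem.Chars.findFrom cs ['*', '/'] ((aSkipWs cs i + 2 : Nat) : Int) none).toNat + 2)
    else some (aSkipWs cs i)
  else some i
termination_by cs.length - i
decreasing_by
  · have hg := aSkipWs_ge cs i
    obtain ⟨hb1, -⟩ := hb
    omega
  · have hg := aSkipWs_ge cs i
    obtain ⟨hb1, -⟩ := hb
    omega

def strip_leading_sql_comments_py (stmt : String) : String :=
  let cs := stmt.toList
  match aLoop cs 0 with
  | none => ""                                      -- the `return ""` exits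
  | some i => String.ofList (PySem.Chars.strip (cs.drop i))   -- `return stmt[i:].strip()`

-- ===== PORT B =====
-- the DFA loop of Source B: walks the characters once; returns (start?, final state)
def bLoop : List Char → Nat → Nat → Option Nat × Nat
  | [], _, st => (none, st)
  | c :: rest, idx, 0 =>
      if PySem.Chars.isspace c then bLoop rest (idx + 1) 0
      else if c = '-' then bLoop rest (idx + 1) 1
      else if c = '/' then bLoop rest (idx + 1) 3
      else (some idx, 0)
  | c :: rest, idx, 1 =>
      if c = '-' then bLoop rest (idx + 1) 2 else (some (idx - 1), 1)
  | c :: rest, idx, 2 => bLoop rest (idx + 1) (if c = '\n' then 0 else 2)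
  | c :: rest, idx, 3 =>
      if c = '*' then bLoop rest (idx + 1) 4 else (some (idx - 1), 3)
  | c :: rest, idx, 4 => bLoop rest (idx + 1) (if c = '*' then 5 else 4)
  | c :: rest, idx, _ => bLoop rest (idx + 1) (if c = '/' then 0 else if c = '*' then 5 else 4)

def strip_leading_sql_comments_py_alt (stmt : String) : String :=
  let cs := stmt.toList
  match bLoop cs 0 0 with
  | (some start, _) => String.ofList (PySem.Chars.strip (cs.drop start))   -- stmt[start:].strip()
  | (none, st) =>
      if st = 1 ∨ st = 3 then String.ofList (PySem.Chars.strip (PySem.List.slice cs (some (-1)) none))  -- stmt[-1:].strip()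
      else ""

-- ===== PRECONDITION & SPEC =====
def Spec_strip_leading_sql_comments_py (stmt : String) (out : String) : Prop := out = strip_leading_sql_comments_py_alt stmt
instance (stmt : String) (out : String) : Decidable (Spec_strip_leading_sql_comments_py stmt out) := by unfold Spec_strip_leading_sql_comments_py; infer_instance

-- ===== CLAIM (what is proved, stated in full; the proofs are below) =====
def Claim_equal_strip_leading_sql_comments_py : Prop := ∀ (stmt : String), Dom_strip_leading_sql_comments_py stmt → Spec_strip_leading_sql_comments_py stmt (strip_leading_sql_comments_py stmt)

-- ===== LEMMAS AND PROOFS =====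

theorem aSkipWs_le (cs : List Char) (i : Nat) (h : i ≤ cs.length) : aSkipWs cs i ≤ cs.length := by
  fun_induction aSkipWs with
  | case1 i h hs ih => exact ih (by omega)
  | case2 => omega
  | case3 => omega

-- interpretation of bLoop's result, as the top level of B reads it (over lists)
def interpB (cs : List Char) (r : Option Nat × Nat) : List Char :=
  match r with
  | (some s, _) => PySem.Chars.strip (cs.drop s)
  | (none, st) => if st = 1 ∨ st = 3 then PySem.Chars.strip (PySem.List.slice cs (some (-1)) none) else []

theorem pvOnePrefix (l : List Char) (x : Nat) (a : Char) :
    ([a] <+: l.drop x) ↔ l[x]? = some a := by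
  constructor
  · rintro ⟨t, ht⟩
    have : (l.drop x)[0]? = some a := by rw [← ht]; rfl
    simpa using this
  · intro h
    obtain ⟨hx, hv⟩ := List.getElem?_eq_some_iff.mp h
    rw [List.drop_eq_getElem_cons hx]
    refine ⟨List.drop (x+1) l, ?_⟩
    rw [hv]
    rfl

theorem pvTwoPrefix (l : List Char) (x : Nat) (a b : Char) :
    ([a, b] <+: l.drop x) ↔ (l[x]? = some a ∧ l[x+1]? = some b) := by
  constructor
  · rintro ⟨t, ht⟩
    have h0 : (l.drop x)[0]? = some a := by rw [← ht]; rfl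
    have h1 : (l.drop x)[1]? = some b := by rw [← ht]; rfl
    constructor
    · simpa using h0
    · simpa using h1
  · rintro ⟨h0, h1⟩
    obtain ⟨hx, e0⟩ := List.getElem?_eq_some_iff.mp h0
    obtain ⟨hx1, e1⟩ := List.getElem?_eq_some_iff.mp h1
    rw [List.drop_eq_getElem_cons hx, List.drop_eq_getElem_cons hx1]
    refine ⟨List.drop (x+1+1) l, ?_⟩
    rw [e0, e1]
    rfl

theorem pvSliceLast (cs : List Char) (h : cs ≠ []) :
    PySem.List.slice cs (some (-1)) none = cs.drop (cs.length - 1) := by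
  have hl : 1 ≤ cs.length := List.length_pos_iff.mpr h
  simp only [PySem.List.slice, PySem.List.clampIdx]
  rw [if_pos (by omega : (-1:Int) < 0), if_neg (by omega : ¬ ((cs.length:Int) + (-1) < 0))]
  have he : ((cs.length : Int) + (-1)).toNat = cs.length - 1 := by omega
  rw [he]
  apply List.take_of_length_le
  rw [List.length_drop]

theorem aSkipWs_stop (cs : List Char) (i : Nat) (h : aSkipWs cs i < cs.length) :
    PySem.Chars.isspace cs[aSkipWs cs i] = false := by
  fun_induction aSkipWs with
  | case1 i hlt hs ih => exact ih h
  | case2 i hlt hs => simpa using hs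
  | case3 i hlt => omega

theorem bLoop_ws (cs : List Char) (i : Nat) :
    bLoop (cs.drop (aSkipWs cs i)) (aSkipWs cs i) 0 = bLoop (cs.drop i) i 0 := by
  fun_induction aSkipWs with
  | case1 i hlt hs ih =>
      rw [ih, List.drop_eq_getElem_cons hlt]
      simp [bLoop, hs]
  | case2 => rfl
  | case3 => rfl

theorem bLoop_line_none (l : List Char) (idx : Nat) (h : '\n' ∉ l) :
    bLoop l idx 2 = (none, 2) := by
  induction l generalizing idx with
  | nil => rfl
  | cons c rest ih =>
      have hc : c ≠ '\n' := fun hc => h (hc ▸ List.mem_cons_self)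
      simp only [bLoop, if_neg hc]
      exact ih _ (fun hm => h (List.mem_cons_of_mem _ hm))

theorem bLoop_line_found (l : List Char) (m idx : Nat)
    (hm : l[m]? = some '\n') (hmin : ∀ j < m, l[j]? ≠ some '\n') :
    bLoop l idx 2 = bLoop (l.drop (m+1)) (idx + (m+1)) 0 := by
  induction l generalizing m idx with
  | nil => simp at hm
  | cons c rest ih =>
      cases m with
      | zero =>
          have : c = '\n' := by simpa using hm
          subst this
          simp [bLoop]
      | succ m' =>
          have hc : c ≠ '\n' := by
            have := hmin 0 (by omega)
            simpa using this
          simp only [bLoop, if_neg hc]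
          have := ih m' (idx + 1) (by simpa using hm)
            (fun j hj => by simpa using hmin (j+1) (by omega))
          rw [this]
          congr 1
          omega

theorem bLoop_block_none (l : List Char) (idx : Nat) (h : ¬ (['*','/'] <:+: l)) :
    (bLoop l idx 4 = (none, 4) ∨ bLoop l idx 4 = (none, 5)) ∧
    (l[0]? ≠ some '/' → (bLoop l idx 5 = (none, 4) ∨ bLoop l idx 5 = (none, 5))) := by
  induction l generalizing idx with
  | nil => exact ⟨Or.inl rfl, fun _ => Or.inr rfl⟩
  | cons c rest ih =>
      have hrest : ¬ (['*','/'] <:+: rest) :=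
        fun hc => h (hc.trans (List.suffix_cons c rest).isInfix)
      have ihr := ih (idx + 1) hrest
      by_cases hc : c = '*'
      · subst hc
        have hr0 : rest[0]? ≠ some '/' := by
          intro h0
          obtain ⟨hx, hv⟩ := List.getElem?_eq_some_iff.mp h0
          apply h
          rcases rest with _ | ⟨d, rest'⟩
          · simp at hx
          · simp at hv
            subst hv
            exact ⟨[], rest', rfl⟩
        constructor
        · simpa [bLoop] using ihr.2 hr0
        · intro _
          simpa [bLoop] using ihr.2 hr0
      · refine ⟨by simpa [bLoop, hc] using ihr.1, ?_⟩
        intro h0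
        have hcs : c ≠ '/' := by simpa using h0
        simpa [bLoop, hc, hcs] using ihr.1

theorem bLoop_block_found (l : List Char) (m idx : Nat)
    (h0 : l[m]? = some '*') (h1 : l[m+1]? = some '/')
    (hmin : ∀ j < m, ¬ (l[j]? = some '*' ∧ l[j+1]? = some '/')) :
    bLoop l idx 4 = bLoop (l.drop (m+2)) (idx + (m+2)) 0 ∧
    (l[0]? ≠ some '/' → bLoop l idx 5 = bLoop (l.drop (m+2)) (idx + (m+2)) 0) := by
  induction l generalizing m idx with
  | nil => simp at h0
  | cons c rest ih =>
      cases m with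
      | zero =>
          have hc : c = '*' := by simpa using h0
          subst hc
          have : rest[0]? = some '/' := by simpa using h1
          obtain ⟨hx, hv⟩ := List.getElem?_eq_some_iff.mp this
          rcases rest with _ | ⟨d, rest'⟩
          · simp at hx
          · simp at hv
            subst hv
            refine ⟨?_, fun _ => ?_⟩ <;> simp [bLoop]
      | succ m' =>
          have h0' : rest[m']? = some '*' := by simpa using h0
          have h1' : rest[m'+1]? = some '/' := by simpa using h1
          have hmin' : ∀ j < m', ¬ (rest[j]? = some '*' ∧ rest[j+1]? = some '/') := by
            intro j hj hp
            exact hmin (j+1) (by omega) (by simpa using hp)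
          have ihr := ih m' (idx + 1) h0' h1' hmin'
          have harith : idx + 1 + (m' + 2) = idx + (m' + 1 + 2) := by omega
          by_cases hc : c = '*'
          · subst hc
            have hr0 : rest[0]? ≠ some '/' := by
              intro hr
              exact hmin 0 (by omega) ⟨by simp, by simpa using hr⟩
            refine ⟨?_, fun _ => ?_⟩ <;>
              · simp only [bLoop, List.drop_succ_cons]
                norm_num
                first
                | rw [if_neg (by decide : ¬ ('*' = '/')), ihr.2 hr0, harith]
                | rw [ihr.2 hr0, harith]
          · refine ⟨?_, fun h0? => ?_⟩
            · simp only [bLoop, if_neg hc, List.drop_succ_cons]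
              rw [ihr.1, harith]
            · have hcs : c ≠ '/' := by simpa using h0?
              simp only [bLoop, if_neg hc, if_neg hcs, List.drop_succ_cons]
              rw [ihr.1, harith]

-- the main loop correspondence: A's outer loop from index i agrees with B's DFA run on the suffix
theorem pvMain (cs : List Char) (n : Nat) : ∀ i, i ≤ cs.length → cs.length - i ≤ n →
    (match aLoop cs i with
     | none => ([] : List Char)
     | some j => PySem.Chars.strip (cs.drop j))
    = interpB cs (bLoop (cs.drop i) i 0) := by
  induction n with
  | zero =>
      intro i hi hn
      have hie : i = cs.length := by omega
      rw [aLoop, dif_neg (by omega)]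
      simp [hie, List.drop_length, bLoop, interpB]
      decide
  | succ n ih =>
      intro i hi hn
      by_cases hlt : i < cs.length
      swap
      · have hie : i = cs.length := by omega
        rw [aLoop, dif_neg (by omega)]
        simp [hie, List.drop_length, bLoop, interpB]
        decide
      rw [aLoop, dif_pos hlt, ← bLoop_ws cs i]
      set j := aSkipWs cs i with hj
      have hji : i ≤ j := aSkipWs_ge cs i
      have hjl : j ≤ cs.length := aSkipWs_le cs i hi
      by_cases hdd : PySem.Chars.startswith (cs.drop j) ['-', '-'] = true
      · -- leading "--" line comment
        rw [if_pos hdd]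
        obtain ⟨hj0, hj1⟩ := (pvTwoPrefix cs j '-' '-').mp ((PySem.Chars.startswith_iff _ _).mp hdd)
        obtain ⟨hj0lt, hj0v⟩ := List.getElem?_eq_some_iff.mp hj0
        obtain ⟨hj1lt, hj1v⟩ := List.getElem?_eq_some_iff.mp hj1
        have hd0 : cs.drop j = '-' :: cs.drop (j+1) := by
          rw [List.drop_eq_getElem_cons hj0lt, hj0v]
        have hd1 : cs.drop (j+1) = '-' :: cs.drop (j+2) := by
          rw [List.drop_eq_getElem_cons hj1lt, hj1v]
        have hB : bLoop (cs.drop j) j 0 = bLoop (cs.drop (j+2)) (j+2) 2 := by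
          rw [hd0, hd1]
          simp [bLoop, show PySem.Chars.isspace '-' = false from by decide]
        rw [hB]
        by_cases hfn : PySem.Chars.findFrom cs ['\n'] (j : Int) none = -1
        · rw [dif_pos hfn]
          have hno : ¬ (['\n'] <:+: cs.drop j) :=
            (PySem.Chars.findFrom_natCast_eq_neg_one_iff cs ['\n'] j hjl).mp hfn
          have hnom : '\n' ∉ cs.drop (j+2) := by
            intro hm
            apply hno
            obtain ⟨u, v, huv⟩ := List.append_of_mem hm
            have hsub : cs.drop (j+2) <:+ cs.drop j := by
              rw [show j + 2 = j + 1 + 1 from rfl, hd0, hd1]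
              exact (List.suffix_cons _ _).trans (List.suffix_cons _ _)
            exact List.IsInfix.trans ⟨u, v, by simp [huv]⟩ hsub.isInfix
          rw [bLoop_line_none _ _ hnom]
          simp [interpB]
        · rw [dif_neg hfn]
          obtain ⟨h1, h2, h3⟩ := PySem.Chars.findFrom_natCast_spec cs ['\n'] j hjl hfn
          obtain ⟨hb1, hb2⟩ := pvFindFrom_bounds cs ['\n'] j hfn
          set m := (PySem.Chars.findFrom cs ['\n'] (j : Int) none).toNat with hmdef
          have hm : cs[m]? = some '\n' := (pvOnePrefix cs m '\n').mp h2
          have hmj : j + 2 ≤ m := by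
            have hne0 : m ≠ j := by
              intro he
              rw [he, hj0] at hm
              simp at hm
            have hne1 : m ≠ j + 1 := by
              intro he
              rw [he, hj1] at hm
              simp at hm
            omega
          have hline := bLoop_line_found (cs.drop (j+2)) (m - (j+2)) (j+2)
            (by rw [List.getElem?_drop]; rw [show j + 2 + (m - (j+2)) = m from by omega]; exact hm)
            (by
              intro j' hj'
              rw [List.getElem?_drop]
              intro hc
              exact h3 (j+2+j') (by omega) (by omega) ((pvOnePrefix cs (j+2+j') '\n').mpr hc))
          rw [List.drop_drop, show j + 2 + (m - (j+2) + 1) = m + 1 from by omega] at hline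
          rw [hline]
          have hb2' : m + 1 ≤ cs.length := by simpa using hb2
          exact ih (m+1) (by omega) (by omega)
      · rw [if_neg hdd]
        by_cases hss : PySem.Chars.startswith (cs.drop j) ['/', '*'] = true
        · -- leading "/*" block comment
          rw [if_pos hss]
          obtain ⟨hj0, hj1⟩ := (pvTwoPrefix cs j '/' '*').mp ((PySem.Chars.startswith_iff _ _).mp hss)
          obtain ⟨hj0lt, hj0v⟩ := List.getElem?_eq_some_iff.mp hj0
          obtain ⟨hj1lt, hj1v⟩ := List.getElem?_eq_some_iff.mp hj1
          have hd0 : cs.drop j = '/' :: cs.drop (j+1) := by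
            rw [List.drop_eq_getElem_cons hj0lt, hj0v]
          have hd1 : cs.drop (j+1) = '*' :: cs.drop (j+2) := by
            rw [List.drop_eq_getElem_cons hj1lt, hj1v]
          have hj2 : j + 2 ≤ cs.length := by omega
          have hB : bLoop (cs.drop j) j 0 = bLoop (cs.drop (j+2)) (j+2) 4 := by
            rw [hd0, hd1]
            simp [bLoop, show PySem.Chars.isspace '/' = false from by decide]
          rw [hB]
          by_cases hfe : PySem.Chars.findFrom cs ['*', '/'] ((j + 2 : Nat) : Int) none = -1
          · rw [dif_pos hfe]
            have hno : ¬ (['*', '/'] <:+: cs.drop (j+2)) :=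
              (PySem.Chars.findFrom_natCast_eq_neg_one_iff cs ['*', '/'] (j+2) hj2).mp hfe
            rcases (bLoop_block_none (cs.drop (j+2)) (j+2) hno).1 with h4 | h5
            · rw [h4]; simp [interpB]
            · rw [h5]; simp [interpB]
          · rw [dif_neg hfe]
            obtain ⟨h1, h2, h3⟩ := PySem.Chars.findFrom_natCast_spec cs ['*', '/'] (j+2) hj2 hfe
            obtain ⟨hb1, hb2⟩ := pvFindFrom_bounds cs ['*', '/'] (j+2) hfe
            set m := (PySem.Chars.findFrom cs ['*', '/'] ((j + 2 : Nat) : Int) none).toNat with hmdef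
            have hmj : j + 2 ≤ m := by omega
            obtain ⟨hm0, hm1⟩ := (pvTwoPrefix cs m '*' '/').mp h2
            have hblock := bLoop_block_found (cs.drop (j+2)) (m - (j+2)) (j+2)
              (by rw [List.getElem?_drop, show j + 2 + (m - (j+2)) = m from by omega]; exact hm0)
              (by rw [List.getElem?_drop, show j + 2 + (m - (j+2) + 1) = m + 1 from by omega]; exact hm1)
              (by
                intro j' hj' hc
                rw [List.getElem?_drop, List.getElem?_drop] at hc
                refine h3 (j+2+j') (by omega) (by omega) ((pvTwoPrefix cs (j+2+j') '*' '/').mpr ?_)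
                refine ⟨hc.1, ?_⟩
                rw [show j + 2 + j' + 1 = j + 2 + (j' + 1) from by omega]
                exact hc.2)
            have hbl := hblock.1
            rw [List.drop_drop, show j + 2 + (m - (j+2) + 2) = m + 2 from by omega] at hbl
            rw [hbl]
            have hb2' : m + 2 ≤ cs.length := by simpa using hb2
            exact ih (m+2) (by omega) (by omega)
        · -- no leading comment: A breaks at j, B stops at j
          rw [if_neg hss]
          show PySem.Chars.strip (cs.drop j) = interpB cs (bLoop (cs.drop j) j 0)
          by_cases hjlen : j < cs.length
          swap
          · have hje : j = cs.length := by omega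
            have hdj : cs.drop j = ([] : List Char) := by rw [hje]; exact List.drop_length
            rw [hdj]
            simp [bLoop, interpB]
            decide
          have hns : PySem.Chars.isspace cs[j] = false := aSkipWs_stop cs i hjlen
          have hd0 : cs.drop j = cs[j] :: cs.drop (j+1) := List.drop_eq_getElem_cons hjlen
          have hjq : cs[j]? = some cs[j] := List.getElem?_eq_getElem hjlen
          by_cases hcd : cs[j] = '-'
          · have hne : cs[j+1]? ≠ some '-' := by
              intro hp
              exact hdd ((PySem.Chars.startswith_iff _ _).mpr
                ((pvTwoPrefix cs j '-' '-').mpr ⟨by rw [hjq, hcd], hp⟩))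
            have hB1 : bLoop (cs.drop j) j 0 = bLoop (cs.drop (j+1)) (j+1) 1 := by
              rw [hd0]
              simp [bLoop, hcd, show PySem.Chars.isspace '-' = false from by decide]
            rw [hB1]
            rcases hdrop : cs.drop (j+1) with _ | ⟨d, t⟩
            · have hlen1 : cs.length ≤ j + 1 := List.drop_eq_nil_iff.mp hdrop
              have hje : j = cs.length - 1 := by omega
              simp only [bLoop, interpB]
              norm_num
              rw [pvSliceLast cs (by intro h; subst h; simp at hjlen), ← hje]
            · have hdq : cs[j+1]? = some d := by
                have : (cs.drop (j+1))[0]? = some d := by rw [hdrop]; rfl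
                simpa [List.getElem?_drop] using this
              have hdne : d ≠ '-' := fun he => hne (he ▸ hdq)
              simp only [bLoop, if_neg hdne, interpB]
              rw [show j + 1 - 1 = j from by omega]
          · by_cases hcs' : cs[j] = '/'
            · have hne : cs[j+1]? ≠ some '*' := by
                intro hp
                exact hss ((PySem.Chars.startswith_iff _ _).mpr
                  ((pvTwoPrefix cs j '/' '*').mpr ⟨by rw [hjq, hcs'], hp⟩))
              have hB1 : bLoop (cs.drop j) j 0 = bLoop (cs.drop (j+1)) (j+1) 3 := by
                rw [hd0]
                simp [bLoop, hcs', show PySem.Chars.isspace '/' = false from by decide]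
              rw [hB1]
              rcases hdrop : cs.drop (j+1) with _ | ⟨d, t⟩
              · have hlen1 : cs.length ≤ j + 1 := List.drop_eq_nil_iff.mp hdrop
                have hje : j = cs.length - 1 := by omega
                simp only [bLoop, interpB]
                norm_num
                rw [pvSliceLast cs (by intro h; subst h; simp at hjlen), ← hje]
              · have hdq : cs[j+1]? = some d := by
                  have : (cs.drop (j+1))[0]? = some d := by rw [hdrop]; rfl
                  simpa [List.getElem?_drop] using this
                have hdne : d ≠ '*' := fun he => hne (he ▸ hdq)
                simp only [bLoop, if_neg hdne, interpB]
                rw [show j + 1 - 1 = j from by omega]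
            · rw [hd0]
              simp [bLoop, hns, hcd, hcs', interpB]

-- ===== VERDICT (by name: the statement is the Claim_ definition above) =====
theorem strip_leading_sql_comments_py_spec : Claim_equal_strip_leading_sql_comments_py := by
  intro stmt _
  unfold Spec_strip_leading_sql_comments_py strip_leading_sql_comments_py strip_leading_sql_comments_py_alt
  show (match aLoop stmt.toList 0 with
        | none => ""
        | some i => String.ofList (PySem.Chars.strip (stmt.toList.drop i)))
      = (match bLoop stmt.toList 0 0 with
        | (some start, _) => String.ofList (PySem.Chars.strip (stmt.toList.drop start))
        | (none, st) =>
            if st = 1 ∨ st = 3 then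
              String.ofList (PySem.Chars.strip (PySem.List.slice stmt.toList (some (-1)) none))
            else "")
  have h := pvMain stmt.toList stmt.toList.length 0 (by omega) (by omega)
  rw [List.drop_zero] at h
  cases ha : aLoop stmt.toList 0 with
  | none =>
      rw [ha] at h
      rcases hb : bLoop stmt.toList 0 0 with ⟨s?, st⟩
      rw [hb] at h
      cases s? with
      | none =>
          show "" = if st = 1 ∨ st = 3 then
              String.ofList (PySem.Chars.strip (PySem.List.slice stmt.toList (some (-1)) none))
            else ""
          simp only [interpB] at h
          split_ifs at h ⊢ with hst
          · rw [← h]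
          · rfl
      | some s =>
          show "" = String.ofList (PySem.Chars.strip (stmt.toList.drop s))
          simp only [interpB] at h
          rw [← h]
  | some jj =>
      rw [ha] at h
      rcases hb : bLoop stmt.toList 0 0 with ⟨s?, st⟩
      rw [hb] at h
      cases s? with
      | none =>
          show String.ofList (PySem.Chars.strip (stmt.toList.drop jj)) = if st = 1 ∨ st = 3 then
              String.ofList (PySem.Chars.strip (PySem.List.slice stmt.toList (some (-1)) none))
            else ""
          simp only [interpB] at h
          split_ifs at h ⊢ with hst
          · rw [h]
          · rw [h]
      | some s =>
          show String.ofList (PySem.Chars.strip (stmt.toList.drop jj))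
             = String.ofList (PySem.Chars.strip (stmt.toList.drop s))
          simp only [interpB] at h
          rw [h]
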